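-- pv_equiv track=rewrite | github.com/SanthuOO7/assignments | solutions/sol_six.py | has_lock
-- ===== SOURCE A (Python) =====
-- def suma_o_resta(a, b):
-- 	return (a & (1<<b))
--
-- def has_lock(v, n):
-- 	suma = 0
-- 	for x in range(1<<n):
-- 		for i in range(n):
-- 			if suma_o_resta(x, i) > 0:
-- 				suma += v[i]
-- 			else:
-- 				suma += -1*v[i]
-- 		if suma%360 == 0:
-- 			return "YES"
-- 		suma = 0
-- 	return "NO"
-- ===== SOURCE B (Python) =====
-- def has_lock(v, n):
--     reachable = {0}
--     for i in range(n):
--         x = v[i]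
--         reachable = {(r + x) % 360 for r in reachable} | {(r - x) % 360 for r in reachable}
--     return "YES" if 0 in reachable else "NO"
-- ===== Notes on version B (the rewrite author's own statement) =====
-- stated objective: alternative
-- what changed: Replaces A's enumeration of all 2^n sign masks (recomputing an n-term signed sum for each) with a dynamic program over the set of residues mod 360 reachable by adding or subtracting each of the first n values once.
import Mathlib
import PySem

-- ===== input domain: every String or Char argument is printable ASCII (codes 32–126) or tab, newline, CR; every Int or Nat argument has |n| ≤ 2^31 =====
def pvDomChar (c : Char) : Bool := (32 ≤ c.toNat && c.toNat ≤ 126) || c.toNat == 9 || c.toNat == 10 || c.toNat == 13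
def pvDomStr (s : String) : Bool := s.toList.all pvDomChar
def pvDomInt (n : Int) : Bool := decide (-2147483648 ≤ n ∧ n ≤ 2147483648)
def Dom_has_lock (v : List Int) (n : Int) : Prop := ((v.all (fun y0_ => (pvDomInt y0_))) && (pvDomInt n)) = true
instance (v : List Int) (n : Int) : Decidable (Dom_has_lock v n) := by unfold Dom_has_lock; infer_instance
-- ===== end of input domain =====

-- B replaces A's enumeration of all 2^n sign masks by a DP over the set of residues mod 360
-- reachable by adding/subtracting each of the first n values (objective: alternative algorithm;
-- no speed claim — A's early return wins on inputs whose answer is YES early).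


-- ===== PORT A =====
def suma_o_resta (a b : Int) : Int := PySem.Int.band a (1 <<< b.toNat)

-- the inner 'for i in range(n)' loop of A, starting from suma = 0 (A resets suma to 0 each iteration)
def hasLockInner (v : List Int) (n : Int) (x : Int) : Int :=
  (PySem.List.pyRange 0 n 1).foldl
    (fun suma i =>
      if suma_o_resta x i > 0 then suma + PySem.List.pyGetD v i 0
      else suma + (-1 * PySem.List.pyGetD v i 0)) 0

-- the outer 'for x in range(1<<n)' loop with its early 'return "YES"'
def hasLockLoop (v : List Int) (n : Int) : List Int → String
  | [] => "NO"
  | x :: rest =>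
    if PySem.Int.mod (hasLockInner v n x) 360 = 0 then "YES"
    else hasLockLoop v n rest

def has_lock (v : List Int) (n : Int) : String :=
  hasLockLoop v n (PySem.List.pyRange 0 (((1 : Nat) <<< n.toNat : Nat) : Int) 1)

-- ===== PORT B =====
-- one DP step over x = v[i]: reachable = {(r+x)%360 for r in reachable} | {(r-x)%360 for r in reachable}
def reachStep (s : PySem.Set Int) (x : Int) : PySem.Set Int :=
  PySem.Set.union (PySem.Set.ofList (s.map (fun r => PySem.Int.mod (r + x) 360)))
                  (PySem.Set.ofList (s.map (fun r => PySem.Int.mod (r - x) 360)))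

def has_lock_alt (v : List Int) (n : Int) : String :=
  let reachable := (PySem.List.pyRange 0 n 1).foldl
    (fun s i => reachStep s (PySem.List.pyGetD v i 0)) (PySem.Set.ofList [0])
  if PySem.Set.contains reachable 0 then "YES" else "NO"

-- ===== PRECONDITION & SPEC =====
-- Pre_ excludes exactly the inputs where A raises: ValueError on 1<<n for n < 0,
-- IndexError on v[i] for n > len(v).
def Pre_has_lock (v : List Int) (n : Int) : Prop := 0 ≤ n ∧ n ≤ PySem.List.len v
instance (v : List Int) (n : Int) : Decidable (Pre_has_lock v n) := by unfold Pre_has_lock; infer_instance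
def pvWitness_has_lock : List Int × Int := ([10, 350], 2)

def Spec_has_lock (v : List Int) (n : Int) (out : String) : Prop := out = has_lock_alt v n
instance (v : List Int) (n : Int) (out : String) : Decidable (Spec_has_lock v n out) := by unfold Spec_has_lock; infer_instance

-- ===== CLAIM (what is proved, stated in full; the proofs are below) =====
def Claim_equal_has_lock : Prop := ∀ (v : List Int) (n : Int), Dom_has_lock v n → Pre_has_lock v n → Spec_has_lock v n (has_lock v n)

-- ===== LEMMAS AND PROOFS =====

-- the signed sum Σ (if bᵢ then lᵢ else -lᵢ)
def signedSum : List Int → List Bool → Int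
  | [], _ => 0
  | _ :: _, [] => 0
  | a :: l, b :: bs => (if b then a else -a) + signedSum l bs

-- the Nat whose binary digits (LSB first) are bs
def ofBits : List Bool → Nat
  | [] => 0
  | b :: bs => b.toNat + 2 * ofBits bs

-- A's outer loop with its early return is an 'any' over the range
theorem hasLockLoop_eq_any (v : List Int) (n : Int) (xs : List Int) :
    hasLockLoop v n xs =
      if xs.any (fun x => PySem.Int.mod (hasLockInner v n x) 360 == 0) then "YES" else "NO" := by
  induction xs with
  | nil => simp [hasLockLoop]
  | cons x rest ih =>
    simp only [hasLockLoop, ih, List.any_cons, Bool.or_eq_true]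
    split_ifs with h1 h2 <;> simp_all <;> tauto

-- A's inner loop is the sum of ±v[j] picked by the bits of x
theorem hasLockInner_eq (v : List Int) (k : Nat) (x : Nat) :
    hasLockInner v (k : Int) (x : Int) =
      ((List.range k).map (fun j => if x.testBit j then v.getD j 0 else -(v.getD j 0))).sum := by
  unfold hasLockInner
  rw [PySem.List.pyRange_zero_nat, List.foldl_map]
  rw [PySem.List.foldl_congr_mem (g := fun suma (j : Nat) =>
        suma + (if x.testBit j then v.getD j 0 else -(v.getD j 0)))]
  · rw [PySem.List.foldl_add]; simp
  · intro acc j _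
    have h2 : suma_o_resta (x : Int) (j : Int) = ((x &&& 2^j : Nat) : Int) := by
      unfold suma_o_resta
      rw [Int.toNat_natCast, show (1 <<< j : Nat) = 2^j from by rw [Nat.shiftLeft_eq, one_mul],
        PySem.Int.band_natCast]
    rw [h2, Nat.and_two_pow]
    by_cases hb : x.testBit j
    · simp [hb]
    · simp [hb]

theorem signedSum_bits (k : Nat) (v : List Int) (x : Nat) :
    signedSum (v.take k) ((List.range k).map x.testBit) =
      ((List.range k).map (fun j => if x.testBit j then v.getD j 0 else -(v.getD j 0))).sum := by
  induction k generalizing v x with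
  | zero => simp [signedSum]
  | succ k ih =>
    rw [List.range_succ_eq_map]
    cases v with
    | nil =>
      simp [signedSum, List.getD, Function.comp_def]
    | cons a t =>
      simp only [List.take_succ_cons, List.map_cons, List.map_map, signedSum, List.sum_cons]
      have hbit : ∀ j : Nat, x.testBit (j+1) = (x/2).testBit j := fun j => Nat.testBit_add_one x j
      congr 1
      rw [show (x.testBit ∘ Nat.succ) = (x/2).testBit from funext fun j => hbit j]
      rw [ih t (x/2)]
      congr 1
      apply List.map_congr_left
      intro j _
      simp [Function.comp, hbit j]

theorem ofBits_lt (bs : List Bool) : ofBits bs < 2 ^ bs.length := by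
  induction bs with
  | nil => simp [ofBits]
  | cons b t ih =>
    have : b.toNat ≤ 1 := Bool.toNat_le b
    simp only [ofBits, List.length_cons, pow_succ]
    omega

theorem testBit_ofBits (bs : List Bool) (j : Nat) : (ofBits bs).testBit j = bs.getD j false := by
  induction bs generalizing j with
  | nil => simp [ofBits]
  | cons b t ih =>
    cases j with
    | zero =>
      rw [Nat.testBit_zero]
      show decide ((b.toNat + 2 * ofBits t) % 2 = 1) = _
      have : (b.toNat + 2 * ofBits t) % 2 = b.toNat % 2 := by omega
      rw [this]
      cases b <;> simp
    | succ j =>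
      rw [Nat.testBit_add_one]
      have : (b.toNat + 2 * ofBits t) / 2 = ofBits t := by
        have : b.toNat ≤ 1 := Bool.toNat_le b
        omega
      rw [show ofBits (b :: t) = b.toNat + 2 * ofBits t from rfl, this, ih]
      simp

theorem bits_of_ofBits (bs : List Bool) : (List.range bs.length).map (ofBits bs).testBit = bs := by
  apply List.ext_getElem
  · simp
  · intro j h1 h2
    simp only [List.getElem_map, List.getElem_range]
    rw [testBit_ofBits]
    simp at h1
    exact List.getD_eq_getElem bs false (by simpa using h1)

theorem mod360_idem (a : Int) : PySem.Int.mod (PySem.Int.mod a 360) 360 = PySem.Int.mod a 360 := by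
  simp only [PySem.Int.mod_eq_emod_of_pos (by norm_num : (0:Int) < 360)]
  omega

theorem mod360_add_left (u s : Int) :
    PySem.Int.mod (PySem.Int.mod u 360 + s) 360 = PySem.Int.mod (u + s) 360 := by
  rw [PySem.Int.mod_eq_emod_of_pos (by norm_num), PySem.Int.mod_eq_emod_of_pos (by norm_num),
    PySem.Int.mod_eq_emod_of_pos (by norm_num)]
  omega

theorem mem_reachStep (s : PySem.Set Int) (a r1 : Int) :
    r1 ∈ reachStep s a ↔ ∃ r0 ∈ s, r1 = PySem.Int.mod (r0 + a) 360 ∨ r1 = PySem.Int.mod (r0 - a) 360 := by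
  unfold reachStep
  rw [PySem.Set.mem_union, PySem.Set.mem_ofList, PySem.Set.mem_ofList]
  simp only [List.mem_map]
  constructor
  · rintro (⟨r0, h0, rfl⟩ | ⟨r0, h0, rfl⟩) <;> exact ⟨r0, h0, by tauto⟩
  · rintro ⟨r0, h0, rfl | rfl⟩ <;> [left; right] <;> exact ⟨r0, h0, rfl⟩

-- DP invariant: the residues reachable after folding over l are exactly the residues of
-- r0 + (a signed sum over l), for r0 in the start set (whose elements are already reduced)
theorem mem_reachFold (l : List Int) (s : PySem.Set Int) (r : Int)
    (hs : ∀ y ∈ s, PySem.Int.mod y 360 = y) :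
    r ∈ l.foldl reachStep s ↔
      ∃ r0 ∈ s, ∃ bs : List Bool, bs.length = l.length ∧
        r = PySem.Int.mod (r0 + signedSum l bs) 360 := by
  induction l generalizing s r with
  | nil =>
    simp only [List.foldl_nil, List.length_nil]
    constructor
    · intro h
      exact ⟨r, h, [], rfl, by rw [show signedSum [] [] = 0 from rfl, add_zero, hs r h]⟩
    · rintro ⟨r0, h0, bs, hlen, rfl⟩
      rw [List.length_eq_zero_iff] at hlen
      subst hlen
      rw [show signedSum [] [] = 0 from rfl, add_zero, hs r0 h0]
      exact h0
  | cons a t ih =>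
    rw [List.foldl_cons, ih _ _ (fun y hy => by
      rcases (mem_reachStep s a y).1 hy with ⟨r0, _, rfl | rfl⟩ <;> exact mod360_idem _)]
    constructor
    · rintro ⟨r1, h1, bs, hlen, rfl⟩
      rcases (mem_reachStep s a r1).1 h1 with ⟨r0, h0, rfl | rfl⟩
      · exact ⟨r0, h0, true :: bs, by simp [hlen], by
          rw [mod360_add_left, show signedSum (a :: t) (true :: bs) = a + signedSum t bs from by
            simp [signedSum]]; ring_nf⟩
      · exact ⟨r0, h0, false :: bs, by simp [hlen], by
          rw [mod360_add_left, show signedSum (a :: t) (false :: bs) = -a + signedSum t bs from by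
            simp [signedSum]]; ring_nf⟩
    · rintro ⟨r0, h0, bs, hlen, rfl⟩
      cases bs with
      | nil => simp at hlen
      | cons b bt =>
        refine ⟨if b then PySem.Int.mod (r0 + a) 360 else PySem.Int.mod (r0 - a) 360,
          (mem_reachStep s a _).2 ⟨r0, h0, by cases b <;> simp⟩, bt, by simpa using hlen, ?_⟩
        have hss : ∀ c, signedSum (a :: t) (c :: bt) = (if c then a else -a) + signedSum t bt :=
          fun c => rfl
        cases b
        · rw [if_neg (by simp), mod360_add_left, hss]; congr 1; simp; ring
        · rw [if_pos rfl, mod360_add_left, hss]; congr 1; simp; ring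

-- A answers YES iff some sign assignment over v[:k] sums to a multiple of 360
theorem a_yes_iff (v : List Int) (k : Nat) :
    ((PySem.List.pyRange 0 ((1 <<< k : Nat) : Int) 1).any
        (fun x => PySem.Int.mod (hasLockInner v (k : Int) x) 360 == 0)) = true ↔
      ∃ bs : List Bool, bs.length = k ∧ PySem.Int.mod (signedSum (v.take k) bs) 360 = 0 := by
  rw [List.any_eq_true]
  constructor
  · rintro ⟨x, hx, hmod⟩
    rw [PySem.List.mem_pyRange_one] at hx
    obtain ⟨hx0, _⟩ := hx
    rw [beq_iff_eq] at hmod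
    refine ⟨(List.range k).map x.toNat.testBit, by simp, ?_⟩
    rw [signedSum_bits, ← hasLockInner_eq, Int.toNat_of_nonneg hx0]
    exact hmod
  · rintro ⟨bs, hlen, hmod⟩
    refine ⟨(ofBits bs : Nat), ?_, ?_⟩
    · rw [PySem.List.mem_pyRange_one]
      constructor
      · positivity
      · have := ofBits_lt bs
        rw [hlen] at this
        have h2 : (1 <<< k : Nat) = 2 ^ k := by rw [Nat.shiftLeft_eq, one_mul]
        rw [h2]
        exact_mod_cast this
    · rw [beq_iff_eq, hasLockInner_eq, ← signedSum_bits]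
      have hb : (List.range k).map (ofBits bs).testBit = bs := by
        rw [← hlen]; exact bits_of_ofBits bs
      rw [hb]; exact hmod

-- B answers YES iff some sign assignment over v[:k] sums to a multiple of 360
theorem b_yes_iff (v : List Int) (k : Nat) (hk : k ≤ v.length) :
    PySem.Set.contains ((v.take k).foldl reachStep (PySem.Set.ofList [0])) 0 = true ↔
      ∃ bs : List Bool, bs.length = k ∧ PySem.Int.mod (signedSum (v.take k) bs) 360 = 0 := by
  rw [PySem.Set.contains_iff]
  rw [mem_reachFold _ _ _ (by intro y hy; simp [PySem.Set.ofList] at hy; subst hy; decide)]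
  constructor
  · rintro ⟨r0, h0, bs, hlen, hr⟩
    have hr0 : r0 = 0 := by simpa [PySem.Set.ofList] using h0
    subst hr0
    refine ⟨bs, by simpa [hk] using hlen, ?_⟩
    rw [zero_add] at hr
    exact hr.symm
  · rintro ⟨bs, hlen, hmod⟩
    exact ⟨0, by simp [PySem.Set.ofList], bs, by simp [hlen, hk], by rw [zero_add, hmod]⟩

theorem has_lock_eq_alt (v : List Int) (n : Int) (h0 : 0 ≤ n) (hlen : n ≤ PySem.List.len v) :
    has_lock v n = has_lock_alt v n := by
  obtain ⟨k, rfl⟩ : ∃ k : Nat, n = (k : Int) := ⟨n.toNat, (Int.toNat_of_nonneg h0).symm⟩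
  have hk : k ≤ v.length := by
    rw [PySem.List.len_eq] at hlen; exact_mod_cast hlen
  unfold has_lock has_lock_alt
  rw [hasLockLoop_eq_any, Int.toNat_natCast]
  have hmap : (List.range k).map (fun j => v.getD j 0) = v.take k := by
    apply List.ext_getElem
    · simp [hk]
    · intro j hj1 hj2
      simp only [List.getElem_map, List.getElem_range, List.getElem_take]
      exact List.getD_eq_getElem v 0 (by simp at hj1; omega)
  have hfold : (PySem.List.pyRange 0 (k : Int) 1).foldl
      (fun s i => reachStep s (PySem.List.pyGetD v i 0)) (PySem.Set.ofList [0]) =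
      (v.take k).foldl reachStep (PySem.Set.ofList [0]) := by
    rw [PySem.List.pyRange_zero_nat, List.foldl_map, ← hmap, ← List.foldl_map]
    simp
  simp only [hfold]
  have hA := a_yes_iff v k
  have hB := b_yes_iff v k hk
  by_cases hP : ∃ bs : List Bool, bs.length = k ∧ PySem.Int.mod (signedSum (v.take k) bs) 360 = 0
  · rw [if_pos (hA.2 hP), if_pos (hB.2 hP)]
  · rw [if_neg (fun h => hP (hA.1 h)), if_neg (fun h => hP (hB.1 h))]

-- ===== VERDICT (by name: the statement is the Claim_ definition above) =====
theorem has_lock_spec : Claim_equal_has_lock := by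
  intro v n _ hpre
  unfold Spec_has_lock
  exact has_lock_eq_alt v n hpre.1 hpre.2
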